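-- pv_equiv track=rewrite | github.com/kotakasahara/IBiSA_tools | bin/convert_state_graphs.py | group_table
-- ===== SOURCE A (Python) =====
-- def group_table(table,dict):
--     table_group = {}
--     for state, val in table.items():
--         grp = dict[state]
--         if grp in table_group:
--             table_group[grp] = (table_group[grp][0] + val[0],
--                                 table_group[grp][1] + val[1])
--         else:
--             table_group[grp] = (val[0], val[1])
--     return table_group
-- ===== SOURCE B (Python) =====
-- def group_table(table, dict):
--     # Two-phase regrouping: first index the vals by group, then sum each bucket.
--     buckets = {}
--     for state, val in table.items():
--         grp = dict[state]
--         buckets[grp] = buckets.get(grp, []) + [val]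
--     return {g: (sum(v[0] for v in vs), sum(v[1] for v in vs))
--             for g, vs in buckets.items()}
-- ===== Notes on version B (the rewrite author's own statement) =====
-- stated objective: alternative
-- what changed: B replaces A's running-pair accumulation with a two-phase decomposition: it first builds an index mapping each group to the list of val tuples belonging to it, then emits the result dict by summing the [0] and [1] fields of each bucket; insertion order of groups is preserved.
import Mathlib
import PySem

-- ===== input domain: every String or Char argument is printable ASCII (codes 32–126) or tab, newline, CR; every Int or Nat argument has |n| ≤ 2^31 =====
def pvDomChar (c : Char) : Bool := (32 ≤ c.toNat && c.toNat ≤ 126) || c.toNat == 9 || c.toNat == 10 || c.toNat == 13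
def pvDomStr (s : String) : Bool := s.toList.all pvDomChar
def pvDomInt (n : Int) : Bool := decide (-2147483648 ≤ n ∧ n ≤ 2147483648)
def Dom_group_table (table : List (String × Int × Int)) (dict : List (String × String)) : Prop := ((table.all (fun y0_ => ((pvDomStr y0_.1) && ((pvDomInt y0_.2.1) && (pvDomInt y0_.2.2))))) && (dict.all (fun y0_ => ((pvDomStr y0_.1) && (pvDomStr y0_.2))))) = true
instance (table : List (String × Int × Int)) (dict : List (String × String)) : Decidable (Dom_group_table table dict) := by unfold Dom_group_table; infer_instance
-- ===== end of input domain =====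

-- B regroups in two phases (bucket the vals by group, then sum each bucket) instead of
-- A's single pass with a running pair per group; same cost, different decomposition.

-- ===== PORT A =====
-- dict[state]: total form of the Python subscript; Pre_ excludes the KeyError inputs.
def pvGrpOf (dict : List (String × String)) (state : String) : String :=
  PySem.Dict.getD (PySem.Dict.mk dict) state ""

def group_table (table : List (String × Int × Int)) (dict : List (String × String)) : List (String × Int × Int) :=
  (table.foldl (fun (tg : PySem.Dict String (Int × Int)) sv =>
      let grp := pvGrpOf dict sv.1
      match tg.get? grp with
      | some old => tg.insert grp (old.1 + sv.2.1, old.2 + sv.2.2)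
      | none     => tg.insert grp (sv.2.1, sv.2.2))
    (PySem.Dict.mk [])).items

-- ===== PORT B =====
def group_table_alt (table : List (String × Int × Int)) (dict : List (String × String)) : List (String × Int × Int) :=
  let buckets : PySem.Dict String (List (Int × Int)) :=
    table.foldl (fun bk sv =>
        PySem.Dict.modify bk (pvGrpOf dict sv.1) [] (fun vs => vs ++ [sv.2]))
      (PySem.Dict.mk [])
  buckets.items.map (fun gv =>
    (gv.1, (gv.2.map (fun v => v.1)).sum, (gv.2.map (fun v => v.2)).sum))

-- ===== PRECONDITION & SPEC =====
-- Pre_ excludes exactly the inputs where Python A raises KeyError: a table state absent from dict.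
def Pre_group_table (table : List (String × Int × Int)) (dict : List (String × String)) : Prop :=
  ∀ p ∈ table, p.1 ∈ dict.map Prod.fst
instance (table : List (String × Int × Int)) (dict : List (String × String)) : Decidable (Pre_group_table table dict) := by unfold Pre_group_table; infer_instance

def pvWitness_group_table : (List (String × Int × Int)) × (List (String × String)) :=
  ([("a", 1, 2), ("b", 3, 4)], [("a", "g"), ("b", "g")])

def Spec_group_table (table : List (String × Int × Int)) (dict : List (String × String)) (out : List (String × Int × Int)) : Prop := out = group_table_alt table dict
instance (table : List (String × Int × Int)) (dict : List (String × String)) (out : List (String × Int × Int)) : Decidable (Spec_group_table table dict out) := by unfold Spec_group_table; infer_instance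

-- ===== CLAIM (what is proved, stated in full; the proofs are below) =====
def Claim_equal_group_table : Prop := ∀ (table : List (String × Int × Int)) (dict : List (String × String)), Dom_group_table table dict → Pre_group_table table dict → Spec_group_table table dict (group_table table dict)

-- ===== LEMMAS AND PROOFS =====

-- the sum of a bucket, as B's final comprehension computes it
def pvSum2 (vs : List (Int × Int)) : Int × Int :=
  ((vs.map (fun v => v.1)).sum, (vs.map (fun v => v.2)).sum)

-- summing each bucket of B's index dict gives A's accumulator dict
def pvAgg (bk : PySem.Dict String (List (Int × Int))) : PySem.Dict String (Int × Int) :=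
  PySem.Dict.mk (bk.items.map (fun p => (p.1, pvSum2 p.2)))

lemma pvAgg_contains (bk : PySem.Dict String (List (Int × Int))) (k : String) :
    (pvAgg bk).contains k = bk.contains k := by
  simp [pvAgg, PySem.Dict.contains, List.any_map, Function.comp_def]

lemma pvAgg_get? (bk : PySem.Dict String (List (Int × Int))) (k : String) :
    (pvAgg bk).get? k = (bk.get? k).map pvSum2 := by
  simp [pvAgg, PySem.Dict.get?, List.find?_map, Function.comp_def, Option.map_map]

lemma pvSum2_append_singleton (vs : List (Int × Int)) (v : Int × Int) :
    pvSum2 (vs ++ [v]) = ((pvSum2 vs).1 + v.1, (pvSum2 vs).2 + v.2) := by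
  simp [pvSum2]

lemma pvAgg_step (bk : PySem.Dict String (List (Int × Int))) (g : String) (v : Int × Int) :
    pvAgg (PySem.Dict.modify bk g [] (fun vs => vs ++ [v])) =
      match (pvAgg bk).get? g with
      | some old => (pvAgg bk).insert g (old.1 + v.1, old.2 + v.2)
      | none     => (pvAgg bk).insert g (v.1, v.2) := by
  by_cases h : bk.contains g = true
  · obtain ⟨old0, hold0⟩ : ∃ w, bk.get? g = some w := by
      have := PySem.Dict.contains_eq_isSome_get? (d := bk) (k := g)
      rw [h] at this
      exact Option.isSome_iff_exists.mp this.symm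
    have hg : (pvAgg bk).get? g = some (pvSum2 old0) := by
      rw [pvAgg_get?, hold0]; rfl
    rw [hg]
    have hgd : PySem.Dict.getD bk g ([] : List (Int × Int)) = old0 := by
      simp [PySem.Dict.getD, hold0]
    have hm : PySem.Dict.modify bk g [] (fun vs => vs ++ [v]) = bk.insert g (old0 ++ [v]) := by
      simp [PySem.Dict.modify, hgd]
    have hca : (pvAgg bk).contains g = true := by rw [pvAgg_contains]; exact h
    apply PySem.Dict.ext
    rw [hm]
    show ((bk.insert g (old0 ++ [v])).items).map (fun p => (p.1, pvSum2 p.2)) = _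
    rw [PySem.Dict.items_insert_of_contains bk _ h,
        PySem.Dict.items_insert_of_contains (pvAgg bk) _ hca]
    show _ = ((bk.items).map (fun p => (p.1, pvSum2 p.2))).map _
    rw [List.map_map, List.map_map]
    apply List.map_congr_left
    intro p _
    by_cases hp : p.1 = g
    · simp [Function.comp_def, hp, pvSum2_append_singleton]
    · simp [Function.comp_def, hp]
  · have hg : bk.get? g = none := by
      have := PySem.Dict.contains_eq_isSome_get? (d := bk) (k := g)
      simp only [h] at this
      exact Option.not_isSome_iff_eq_none.mp (by rw [← this]; simp)
    have hga : (pvAgg bk).get? g = none := by rw [pvAgg_get?, hg]; rfl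
    rw [hga]
    have hm : PySem.Dict.modify bk g [] (fun vs => vs ++ [v]) = bk.insert g [v] := by
      simp [PySem.Dict.modify, PySem.Dict.getD, hg]
    have hca : (pvAgg bk).contains g = false := by rw [pvAgg_contains]; simpa using h
    apply PySem.Dict.ext
    rw [hm]
    show ((bk.insert g [v]).items).map (fun p => (p.1, pvSum2 p.2)) = _
    rw [PySem.Dict.items_insert_of_not_contains bk _ (by simpa using h),
        PySem.Dict.items_insert_of_not_contains (pvAgg bk) _ hca]
    simp [pvAgg, pvSum2]

lemma pvLoop (dict : List (String × String)) (table : List (String × Int × Int)) :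
    ∀ bk : PySem.Dict String (List (Int × Int)),
      table.foldl (fun tg sv =>
          let grp := pvGrpOf dict sv.1
          match tg.get? grp with
          | some old => tg.insert grp (old.1 + sv.2.1, old.2 + sv.2.2)
          | none     => tg.insert grp (sv.2.1, sv.2.2)) (pvAgg bk)
        = pvAgg (table.foldl (fun bk sv =>
            PySem.Dict.modify bk (pvGrpOf dict sv.1) [] (fun vs => vs ++ [sv.2])) bk) := by
  induction table with
  | nil => intro bk; rfl
  | cons sv rest ih =>
      intro bk
      simp only [List.foldl_cons]
      rw [← pvAgg_step bk (pvGrpOf dict sv.1) sv.2]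
      exact ih _

-- ===== VERDICT (by name: the statement is the Claim_ definition above) =====
theorem group_table_spec : Claim_equal_group_table := by
  intro table dict _ _
  unfold Spec_group_table group_table group_table_alt
  have h0 : (PySem.Dict.mk ([] : List (String × (Int × Int)))) =
      pvAgg (PySem.Dict.mk []) := rfl
  rw [h0, pvLoop]
  rfl
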